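-- pv_equiv track=rewrite | github.com/Mike-Arnold/Flexible | transmute.py | level_to_edgelist
-- ===== SOURCE A (Python) =====
-- def level_to_edgelist(level):
--     edgelist = []
--
--     for i in range(1,len(level)):
--         searching = 1
--         second = i
--         first = i-1
--         while searching:
--             if level[first] < level[second]:
--                 edgelist.append([first,second])
--                 searching = 0
--             else:
--                 first -= 1
--     return edgelist
-- ===== SOURCE B (Python) =====
-- def level_to_edgelist(level):
--     # O(n): one monotonic-stack pass over the doubled list reproduces A's
--     # backward scan (which wraps into negative Python indices past the start).
--     n = len(level)
--     ext = level + level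
--     stack = []
--     prev = []
--     for p, v in enumerate(ext):
--         while stack and ext[stack[-1]] >= v:
--             stack.pop()
--         prev.append(stack[-1] if stack else None)
--         stack.append(p)
--     return [[prev[n + i] - n, i] for i in range(1, n)]
-- ===== Notes on version B (the rewrite author's own statement) =====
-- stated objective: alternative
-- what changed: Replaces the per-index backward linear scan by a single monotonic-stack pass over the doubled list, which yields every nearest-previous-smaller index (including A's negative wrapped indices) in one sweep.
import Mathlib
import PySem

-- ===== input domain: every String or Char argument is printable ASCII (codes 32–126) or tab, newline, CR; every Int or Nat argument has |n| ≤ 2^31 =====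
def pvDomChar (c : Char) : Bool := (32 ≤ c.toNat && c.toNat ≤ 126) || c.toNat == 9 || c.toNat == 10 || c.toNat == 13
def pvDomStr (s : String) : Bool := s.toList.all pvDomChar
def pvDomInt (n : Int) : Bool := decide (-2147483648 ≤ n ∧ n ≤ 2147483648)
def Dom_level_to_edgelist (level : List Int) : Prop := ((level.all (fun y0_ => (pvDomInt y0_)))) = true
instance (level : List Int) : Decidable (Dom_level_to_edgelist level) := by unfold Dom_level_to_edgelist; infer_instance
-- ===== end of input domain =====

-- B replaces A's per-index backward scan by one monotonic-stack pass over the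
-- doubled list (objective: alternative algorithm, same results).

-- ===== PORT A =====
-- the 'while searching' loop: first decreases until level[first] < v (found) or
-- the index leaves [-len, len) (Python IndexError → none); the fuel argument only
-- makes the recursion structural — one of those two exits is reached first.
def loopA (level : List Int) (v : Int) : Int → Nat → Option Int
  | _, 0 => none
  | first, fuel+1 =>
    match PySem.List.pyGet? level first with
    | none => none
    | some x => if x < v then some first else loopA level v (first - 1) fuel

def level_to_edgelist (level : List Int) : List (List Int) :=
  (PySem.List.pyRange 1 (level.length : Int) 1).foldl (fun acc i =>
    match PySem.List.pyGet? level i with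
    | none => acc      -- unreachable: i is in range
    | some v =>
      match loopA level v (i - 1) (2 * level.length + 2) with
      | some first => acc ++ [[first, i]]
      | none => acc)   -- the while loop raised IndexError: excluded by Pre_
    []

-- ===== PORT B =====
-- 'while stack and ext[stack[-1]] >= v: stack.pop()'  (list head = Python stack[-1])
def popB (ext : List Int) (v : Int) : List Nat → List Nat
  | [] => []
  | q :: st => if v ≤ ext.getD q 0 then popB ext v st else q :: st

-- one iteration of 'for p, v in enumerate(ext)'; state = (stack, prev)
def stepB (ext : List Int) (s : List Nat × List (Option Nat)) (pv : Int × Int) :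
    List Nat × List (Option Nat) :=
  let st := popB ext pv.2 s.1
  (pv.1.toNat :: st, s.2 ++ [st.head?])

def level_to_edgelist_alt (level : List Int) : List (List Int) :=
  let n := level.length
  let ext := level ++ level
  let prev := ((PySem.List.enumerate ext 0).foldl (stepB ext) ([], [])).2
  (PySem.List.pyRange 1 (n : Int) 1).map (fun i =>
    match prev.getD (n + i.toNat) none with
    | some p => [(p : Int) - (n : Int), i]
    | none => [])     -- Python raises TypeError (None - int) here: excluded by Pre_

-- ===== PRECONDITION & SPEC =====
-- Pre_ holds exactly where A returns: every element except the first has a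
-- strictly smaller element somewhere in the list; otherwise A's backward scan
-- walks past index -len(level) and raises IndexError (and B raises TypeError).
def Pre_level_to_edgelist (level : List Int) : Prop :=
  ∀ i < level.length, 1 ≤ i → ∃ j < level.length, level.getD j 0 < level.getD i 0
instance (level : List Int) : Decidable (Pre_level_to_edgelist level) := by
  unfold Pre_level_to_edgelist; infer_instance

def pvWitness_level_to_edgelist : List Int := [0, 2, 1, 3]

def Spec_level_to_edgelist (level : List Int) (out : List (List Int)) : Prop :=
  out = level_to_edgelist_alt level
instance (level : List Int) (out : List (List Int)) : Decidable (Spec_level_to_edgelist level out) := by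
  unfold Spec_level_to_edgelist; infer_instance

-- ===== CLAIM (what is proved, stated in full; the proofs are below) =====
def Claim_equal_level_to_edgelist : Prop :=
  ∀ (level : List Int), Dom_level_to_edgelist level → Pre_level_to_edgelist level →
    Spec_level_to_edgelist level (level_to_edgelist level)

-- ===== LEMMAS AND PROOFS =====

-- the common reference function: greatest q < p with xs[q] < v
def findPrev (xs : List Int) (v : Int) : Nat → Option Nat
  | 0 => none
  | p+1 => if xs.getD p 0 < v then some p else findPrev xs v p

-- the stack contents after the pass has processed positions 0..p-1 (head = top)
def canonSt (xs : List Int) (p : Nat) : List Nat :=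
  ((List.range p).filter
    (fun q => decide (∀ r < p, q < r → xs.getD q 0 < xs.getD r 0))).reverse

-- A's index 'first = p - n' (negative = Python wraparound) reads the doubled list at p
theorem pyGet_ext (level : List Int) (p : Nat) (hp : p < 2 * level.length) :
    PySem.List.pyGet? level ((p : Int) - (level.length : Int)) =
      some ((level ++ level).getD p 0) := by
  have hgd : (level ++ level).getD p 0 = (level ++ level)[p]?.getD 0 := List.getD_eq_getElem?_getD
  simp only [PySem.List.pyGet?, PySem.List.pyIdx?]
  rcases Nat.lt_or_ge p level.length with h | h
  · rw [if_neg (by omega), if_pos (by omega)]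
    have h1 : level.length - (-((p:Int) - (level.length:Int))).toNat = p := by omega
    rw [h1, Option.bind, hgd, List.getElem?_append_left h,
        List.getElem?_eq_getElem h]
    rfl
  · rw [if_pos (by omega), if_pos (by omega)]
    have h1 : ((p:Int) - (level.length:Int)).toNat = p - level.length := by omega
    have h2 : p - level.length < level.length := by omega
    rw [h1, Option.bind, hgd, List.getElem?_append_right h,
        List.getElem?_eq_getElem h2]
    rfl

theorem loopA_eq_findPrev (level : List Int) (v : Int) (p fuel : Nat)
    (hp : p ≤ 2 * level.length) (hf : p < fuel) :
    loopA level v ((p : Int) - (level.length : Int) - 1) fuel =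
      (findPrev (level ++ level) v p).map (fun q => (q : Int) - (level.length : Int)) := by
  induction p generalizing fuel with
  | zero =>
    obtain ⟨f, rfl⟩ : ∃ f, fuel = f + 1 := ⟨fuel - 1, by omega⟩
    have hnone : PySem.List.pyGet? level (-(level.length : Int) - 1) = none := by
      simp only [PySem.List.pyGet?, PySem.List.pyIdx?]
      rw [if_neg (by omega), if_neg (by omega)]
      rfl
    have harg : ((0:Nat) : Int) - (level.length : Int) - 1 = -(level.length : Int) - 1 := by
      push_cast; ring
    rw [harg, loopA, hnone]
    simp [findPrev]
  | succ p ih =>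
    obtain ⟨f, rfl⟩ : ∃ f, fuel = f + 1 := ⟨fuel - 1, by omega⟩
    have hget : PySem.List.pyGet? level ((p : Int) - (level.length : Int)) =
        some ((level ++ level).getD p 0) := pyGet_ext level p (by omega)
    have harg : (((p+1:Nat)) : Int) - (level.length : Int) - 1 = (p : Int) - level.length := by
      push_cast; ring
    rw [harg, loopA, hget]
    dsimp only
    by_cases h : (level ++ level).getD p 0 < v
    · rw [if_pos h]
      have : findPrev (level ++ level) v (p+1) = some p := by rw [findPrev, if_pos h]
      rw [this]; rfl
    · rw [if_neg h]
      have : findPrev (level ++ level) v (p+1) = findPrev (level ++ level) v p := by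
        rw [findPrev, if_neg h]
      rw [this]
      exact ih f (by omega) (by omega)

theorem findPrev_isSome (xs : List Int) (v : Int) (p : Nat)
    (h : ∃ q < p, xs.getD q 0 < v) : (findPrev xs v p).isSome := by
  induction p with
  | zero => omega
  | succ p ih =>
    rw [findPrev]
    by_cases hc : xs.getD p 0 < v
    · rw [if_pos hc]; rfl
    · rw [if_neg hc]
      apply ih
      obtain ⟨q, hq, hv⟩ := h
      exact ⟨q, by
        rcases Nat.lt_or_ge q p with h' | h'
        · exact h'
        · exfalso; have : q = p := by omega
          subst this; exact hc hv, hv⟩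

theorem mem_canonSt_lt {xs : List Int} {p q : Nat} (h : q ∈ canonSt xs p) : q < p := by
  simp only [canonSt, List.mem_reverse, List.mem_filter, List.mem_range] at h
  exact h.1

theorem mem_canonSt_cond {xs : List Int} {p q : Nat} (h : q ∈ canonSt xs p) :
    ∀ r < p, q < r → xs.getD q 0 < xs.getD r 0 := by
  simp only [canonSt, List.mem_reverse, List.mem_filter, List.mem_range,
    decide_eq_true_eq] at h
  exact h.2

theorem canonSt_pairwise_gt (xs : List Int) (p : Nat) :
    (canonSt xs p).Pairwise (· > ·) := by
  rw [canonSt, List.pairwise_reverse]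
  exact (List.pairwise_lt_range).filter _

theorem canonSt_pairwise_val (xs : List Int) (p : Nat) :
    (canonSt xs p).Pairwise (fun a b => xs.getD b 0 < xs.getD a 0) := by
  refine (canonSt_pairwise_gt xs p).imp_of_mem ?_
  intro a b ha hb hab
  exact mem_canonSt_cond hb a (mem_canonSt_lt ha) hab

theorem popB_eq_filter (xs : List Int) (v : Int) (L : List Nat)
    (h : L.Pairwise (fun a b => xs.getD b 0 < xs.getD a 0)) :
    popB xs v L = L.filter (fun q => decide (xs.getD q 0 < v)) := by
  induction L with
  | nil => rfl
  | cons q st ih =>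
    rw [List.pairwise_cons] at h
    by_cases hc : v ≤ xs.getD q 0
    · rw [popB, if_pos hc, ih h.2,
        List.filter_cons_of_neg (by simp only [decide_eq_true_eq]; omega)]
    · rw [popB, if_neg hc,
        List.filter_cons_of_pos (by simp only [decide_eq_true_eq]; omega)]
      congr 1
      symm
      rw [List.filter_eq_self]
      intro b hb
      simp only [decide_eq_true_eq]
      have := h.1 b hb
      omega

theorem canonSt_succ (xs : List Int) (p : Nat) :
    canonSt xs (p+1) =
      p :: (canonSt xs p).filter (fun q => decide (xs.getD q 0 < xs.getD p 0)) := by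
  unfold canonSt
  rw [List.filter_reverse, List.filter_filter]
  have hF : List.filter (fun q => decide (∀ r < p + 1, q < r → xs.getD q 0 < xs.getD r 0)) (List.range p)
      = List.filter (fun a => decide (xs.getD a 0 < xs.getD p 0) &&
          decide (∀ r < p, a < r → xs.getD a 0 < xs.getD r 0)) (List.range p) := by
    apply List.filter_congr
    intro q hq
    rw [List.mem_range] at hq
    rw [Bool.eq_iff_iff]
    simp only [Bool.and_eq_true, decide_eq_true_eq]
    constructor
    · intro hall
      exact ⟨hall p (by omega) hq, fun r hr hqr => hall r (by omega) hqr⟩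
    · rintro ⟨hvp, hall⟩ r hr hqr
      rcases Nat.lt_or_ge r p with h' | h'
      · exact hall r h' hqr
      · have : r = p := by omega
        subst this; exact hvp
  have hsing : List.filter (fun q => decide (∀ r < p + 1, q < r → xs.getD q 0 < xs.getD r 0)) [p] = [p] := by
    have hd : (decide (∀ r < p + 1, p < r → xs.getD p 0 < xs.getD r 0)) = true := by
      simp only [decide_eq_true_eq]; intro r hr hpr; omega
    rw [List.filter_cons, hd]
    simp
  rw [List.range_succ, List.filter_append, hsing, hF, List.reverse_append]
  rfl

theorem head_filter_canonSt (xs : List Int) (v : Int) (p : Nat) :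
    ((canonSt xs p).filter (fun q => decide (xs.getD q 0 < v))).head? = findPrev xs v p := by
  induction p with
  | zero => rfl
  | succ p ih =>
    rw [canonSt_succ, findPrev]
    by_cases h : xs.getD p 0 < v
    · rw [List.filter_cons_of_pos (by simp only [decide_eq_true_eq]; exact h), if_pos h]
      rfl
    · rw [List.filter_cons_of_neg (by simp only [decide_eq_true_eq]; exact h), if_neg h,
        List.filter_filter, ← ih]
      congr 1
      apply List.filter_congr
      intro q hq
      rw [Bool.eq_iff_iff]
      simp only [Bool.and_eq_true, decide_eq_true_eq]
      constructor
      · rintro ⟨h1, _⟩ ; exact h1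
      · intro h1; exact ⟨h1, by omega⟩

theorem enumerate_eq_map (xs : List Int) (s : Int) :
    PySem.List.enumerate xs s =
      (List.range xs.length).map (fun q : Nat => (s + (q : Int), xs.getD q 0)) := by
  induction xs generalizing s with
  | nil => rfl
  | cons x xs ih =>
    rw [PySem.List.enumerate_cons, ih, List.length_cons, List.range_succ_eq_map,
      List.map_cons, List.map_map]
    congr 1
    · simp
    · apply List.map_congr_left
      intro q hq
      simp only [Function.comp_apply, List.getD_cons_succ]
      congr 1
      push_cast
      ring

theorem foldB_eq (ext : List Int) (m : Nat) (hm : m ≤ ext.length) :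
    ((List.range m).map (fun q : Nat => ((q : Int), ext.getD q 0))).foldl (stepB ext) ([], []) =
      (canonSt ext m, (List.range m).map (fun q => findPrev ext (ext.getD q 0) q)) := by
  induction m with
  | zero => rfl
  | succ m ih =>
    rw [List.range_succ, List.map_append, List.foldl_append, ih (by omega),
      List.map_append, List.map_cons, List.map_nil, List.foldl_cons, List.foldl_nil]
    unfold stepB
    rw [popB_eq_filter ext (ext.getD m 0) _ (canonSt_pairwise_val ext m)]
    dsimp only
    rw [head_filter_canonSt, Int.toNat_natCast, ← canonSt_succ]
    simp

theorem getD_ext_right (level : List Int) (k : Nat) (hk : k < level.length) :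
    (level ++ level).getD (level.length + k) 0 = level.getD k 0 := by
  rw [List.getD_eq_getElem?_getD, List.getD_eq_getElem?_getD,
    List.getElem?_append_right (by omega), Nat.add_sub_cancel_left]

theorem getD_ext_left (level : List Int) (k : Nat) (hk : k < level.length) :
    (level ++ level).getD k 0 = level.getD k 0 := List.getD_append _ _ _ _ hk

theorem main_eq (level : List Int) (hpre : Pre_level_to_edgelist level) :
    level_to_edgelist level = level_to_edgelist_alt level := by
  unfold level_to_edgelist level_to_edgelist_alt
  have hextlen : (level ++ level).length = 2 * level.length := by
    rw [List.length_append]; omega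
  simp only []
  -- the prev array is the table of nearest-previous-smaller results
  have hprev : ((PySem.List.enumerate (level ++ level) 0).foldl (stepB (level ++ level)) ([], [])).2
      = (List.range (level ++ level).length).map
          (fun q => findPrev (level ++ level) ((level ++ level).getD q 0) q) := by
    rw [enumerate_eq_map]
    have : (List.range (level ++ level).length).map
        (fun q : Nat => ((0 : Int) + (q : Int), (level ++ level).getD q 0)) =
        (List.range (level ++ level).length).map
        (fun q : Nat => ((q : Int), (level ++ level).getD q 0)) := by
      apply List.map_congr_left; intro q hq; simp
    rw [this, foldB_eq _ _ (le_refl _)]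
  rw [hprev]
  rw [PySem.List.foldl_congr_mem _ _
    (fun acc i => acc ++ [(fun i : Int =>
      match ((List.range (level ++ level).length).map
          (fun q => findPrev (level ++ level) ((level ++ level).getD q 0) q)).getD
          (level.length + i.toNat) none with
      | some p => [(p : Int) - (level.length : Int), i]
      | none => []) i]) []
    ?_, PySem.List.foldl_append_singleton_eq_map, List.nil_append]
  intro acc i hi
  rw [PySem.List.mem_pyRange_one] at hi
  obtain ⟨hi1, hi2⟩ := hi
  set n := level.length with hn
  have hii : i = ((i.toNat : Nat) : Int) := (Int.toNat_of_nonneg (by omega)).symm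
  set ii := i.toNat with hiidef
  have hii1 : 1 ≤ ii := by omega
  have hii2 : ii < n := by omega
  -- the value v = level[i]
  have hv : PySem.List.pyGet? level i = some (level.getD ii 0) := by
    rw [hii, PySem.List.pyGet?_natCast, List.getElem?_eq_getElem (by omega),
      List.getD_eq_getElem?_getD, List.getElem?_eq_getElem (by omega)]
    rfl
  -- table lookup
  have hlook : ((List.range (level ++ level).length).map
      (fun q => findPrev (level ++ level) ((level ++ level).getD q 0) q)).getD
      (n + ii) none = findPrev (level ++ level) (level.getD ii 0) (n + ii) := by
    rw [PySem.List.getD_map_range _ _ _ _ (by omega), getD_ext_right _ _ hii2]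
  -- the scan finds something
  have hsome : (findPrev (level ++ level) (level.getD ii 0) (n + ii)).isSome := by
    apply findPrev_isSome
    obtain ⟨j, hj, hjv⟩ := hpre ii hii2 hii1
    rcases Nat.lt_or_ge j ii with h' | h'
    · exact ⟨n + j, by omega, by rw [getD_ext_right _ _ hj]; exact hjv⟩
    · exact ⟨j, by omega, by rw [getD_ext_left _ _ hj]; exact hjv⟩
  obtain ⟨q0, hq0⟩ := Option.isSome_iff_exists.mp hsome
  -- the A-side loop
  have hloop : loopA level (level.getD ii 0) (i - 1) (2 * n + 2) =
      some ((q0 : Int) - (n : Int)) := by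
    have harg : i - 1 = (((n + ii : Nat)) : Int) - (n : Int) - 1 := by push_cast; omega
    rw [harg, loopA_eq_findPrev _ _ _ _ (by omega) (by omega), hq0]
    rfl
  rw [hv]
  dsimp only
  rw [hloop, ← hiidef, hlook, hq0]

-- ===== VERDICT (by name: the statement is the Claim_ definition above) =====
theorem level_to_edgelist_spec : Claim_equal_level_to_edgelist := by
  intro level _ hpre
  unfold Spec_level_to_edgelist
  exact main_eq level hpre
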